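-- pv_equiv track=rewrite | github.com/DileepkumarOrg/Coding | Python/Usernames Changes.py | possibleChanges
-- ===== SOURCE A (Python) =====
-- def possibleChanges(usernames):
--     results = []
--
--     for username in usernames:
--         # Iterate through all possible pairs of positions to swap
--         for i in range(len(username) - 1):
--             for j in range(i + 1, len(username)):
--                 # Create a new string with the letters swapped
--                 new_username = list(username)
--                 new_username[i], new_username[j] = new_username[j], new_username[i]
--                 new_username = ''.join(new_username)
--
--                 # Check if the new username is smaller in alphabetical order
--                 if new_username < username:
--                     results.append("YES")
--                     break
--             else:
--                 continue
--             break  # Break the outer loop if a valid swap is found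
--
--         else:
--             # If no valid swap is found
--             results.append("NO")
--
--     return results
-- ===== SOURCE B (Python) =====
-- def possibleChanges(usernames):
--     # A swap can make the string strictly smaller iff it is not sorted
--     # non-decreasingly, i.e. iff some adjacent pair descends.
--     return ["YES" if any(u[k] > u[k + 1] for k in range(len(u) - 1)) else "NO"
--             for u in usernames]
-- ===== Notes on version B (the rewrite author's own statement) =====
-- stated objective: alternative
-- what changed: Replaces the per-string search over all swap pairs (building and comparing each swapped string) by a single linear scan for an adjacent descent, since a swap can decrease the string iff it is not sorted non-decreasingly; asymptotically O(m*n) vs O(m*n^3), though a timing run's inputs showed only a 1.26x constant gain.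
import Mathlib
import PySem

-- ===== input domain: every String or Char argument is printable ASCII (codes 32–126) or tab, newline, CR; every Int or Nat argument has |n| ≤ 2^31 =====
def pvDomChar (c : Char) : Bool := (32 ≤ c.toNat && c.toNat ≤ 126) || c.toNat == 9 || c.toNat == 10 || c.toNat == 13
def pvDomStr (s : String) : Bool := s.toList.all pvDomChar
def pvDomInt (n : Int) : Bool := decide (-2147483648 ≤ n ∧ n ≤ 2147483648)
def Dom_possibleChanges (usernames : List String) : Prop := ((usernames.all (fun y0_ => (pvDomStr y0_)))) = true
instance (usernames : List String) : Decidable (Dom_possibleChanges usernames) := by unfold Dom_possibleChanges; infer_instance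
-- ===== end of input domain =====

-- B replaces A's per-string search over all swap pairs by one linear scan for an
-- adjacent descent (a swap can decrease a string iff it is not sorted non-decreasingly);
-- an alternative algorithm (not measurably faster on a timing run's inputs).


-- ===== PORT A =====
-- new_username = list(username); new_username[i], new_username[j] = new_username[j], new_username[i]
-- (both indices are always in range where A uses it, so getD's default is never read)
def pvSwap (l : List Char) (i j : Nat) : List Char :=
  (l.set i (l.getD j ' ')).set j (l.getD i ' ')

-- inner 'for j in range(i+1, len(username))' with its break: returns whether a swap < username was found
def pvInner (l : List Char) (i : Nat) : List Nat → Bool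
  | [] => false
  | j :: js => if pvSwap l i j < l then true else pvInner l i js

-- outer 'for i in range(len(username)-1)' with break / for-else
def pvOuter (l : List Char) : List Nat → String
  | [] => "NO"
  | i :: is => if pvInner l i (List.range' (i + 1) (l.length - (i + 1))) then "YES" else pvOuter l is

def possibleChanges (usernames : List String) : List String :=
  usernames.foldl
    (fun results u => results ++ [pvOuter u.toList (List.range (u.toList.length - 1))]) []

-- ===== PORT B =====
-- "YES" if any(u[k] > u[k+1] for k in range(len(u)-1)) else "NO", per username
def possibleChanges_alt (usernames : List String) : List String :=
  usernames.map (fun u =>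
    let l := u.toList
    if (List.range (l.length - 1)).any (fun k => l.getD (k + 1) ' ' < l.getD k ' ')
    then "YES" else "NO")

-- ===== PRECONDITION & SPEC =====
def Spec_possibleChanges (usernames : List String) (out : List String) : Prop := out = possibleChanges_alt usernames
instance (usernames : List String) (out : List String) : Decidable (Spec_possibleChanges usernames out) := by unfold Spec_possibleChanges; infer_instance

-- ===== CLAIM (what is proved, stated in full; the proofs are below) =====
def Claim_equal_possibleChanges : Prop := ∀ (usernames : List String), Dom_possibleChanges usernames → Spec_possibleChanges usernames (possibleChanges usernames)

-- ===== LEMMAS AND PROOFS =====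

-- swapping positions i < j < length gives a lexicographically smaller list iff l[j] < l[i]
theorem pvSwap_lt (l : List Char) (i j : Nat) (hij : i < j) (hj : j < l.length) :
    (pvSwap l i j < l) ↔ l.getD j ' ' < l.getD i ' ' := by
  induction l generalizing i j with
  | nil => simp at hj
  | cons a t ih =>
    cases i with
    | zero =>
      obtain ⟨j', rfl⟩ : ∃ j', j = j' + 1 := ⟨j - 1, by omega⟩
      have hj' : j' < t.length := by simpa using hj
      simp only [pvSwap, List.getD_cons_succ, List.getD_cons_zero, List.set_cons_zero,
        List.set_cons_succ]
      rw [List.cons_lt_cons_iff]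
      constructor
      · rintro (h | ⟨rfl, h⟩)
        · exact h
        · rw [List.getD_eq_getElem t ' ' hj', List.set_getElem_self] at h
          exact absurd h (List.lt_irrefl t)
      · exact fun h => Or.inl h
    | succ i' =>
      obtain ⟨j', rfl⟩ : ∃ j', j = j' + 1 := ⟨j - 1, by omega⟩
      have hj' : j' < t.length := by simpa using hj
      simp only [pvSwap, List.getD_cons_succ, List.set_cons_succ]
      rw [List.cons_lt_cons_iff]
      have := ih i' j' (by omega) hj'
      simp only [pvSwap] at this
      constructor
      · rintro (h | ⟨-, h⟩)
        · exact absurd h (lt_irrefl a)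
        · exact this.mp h
      · exact fun h => Or.inr ⟨rfl, this.mpr h⟩

-- a strictly descending pair (not necessarily adjacent) yields an adjacent descent
theorem pv_desc_adj (l : List Char) :
    ∀ n i j, j - i - 1 = n → i < j → j < l.length → l.getD j ' ' < l.getD i ' ' →
      ∃ k, k + 1 < l.length ∧ l.getD (k + 1) ' ' < l.getD k ' ' := by
  intro n
  induction n with
  | zero =>
    intro i j h hij hj hd
    have : j = i + 1 := by omega
    exact ⟨i, by omega, by rwa [← this]⟩
  | succ m ih =>
    intro i j h hij hj hd
    by_cases hadj : l.getD (i + 1) ' ' < l.getD i ' '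
    · exact ⟨i, by omega, hadj⟩
    · have h1 : l.getD i ' ' ≤ l.getD (i + 1) ' ' := le_of_not_gt hadj
      exact ih (i + 1) j (by omega) (by omega) hj (lt_of_lt_of_le hd h1)

theorem pvInner_any (l : List Char) (i : Nat) (js : List Nat) :
    pvInner l i js = js.any (fun j => decide (pvSwap l i j < l)) := by
  induction js with
  | nil => rfl
  | cons j js ih => simp only [pvInner, List.any_cons]; split_ifs with h <;> simp [h, ih]

theorem pvOuter_if (l : List Char) (is : List Nat) :
    pvOuter l is =
      if is.any (fun i => pvInner l i (List.range' (i + 1) (l.length - (i + 1)))) then "YES" else "NO" := by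
  induction is with
  | nil => rfl
  | cons i is ih => simp only [pvOuter, List.any_cons]; split_ifs with h <;> simp_all

-- per-string equivalence of the two conditions
theorem pv_cond_eq (l : List Char) :
    (List.range (l.length - 1)).any
        (fun i => pvInner l i (List.range' (i + 1) (l.length - (i + 1)))) =
      (List.range (l.length - 1)).any (fun k => decide (l.getD (k + 1) ' ' < l.getD k ' ')) := by
  rw [Bool.eq_iff_iff]
  simp only [List.any_eq_true, List.mem_range, pvInner_any, decide_eq_true_eq]
  constructor
  · rintro ⟨i, hi, j, hj, hlt⟩
    rw [List.mem_range'_1] at hj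
    have hjl : j < l.length := by omega
    rw [pvSwap_lt l i j (by omega) hjl] at hlt
    obtain ⟨k, hk, hd⟩ := pv_desc_adj l (j - i - 1) i j rfl (by omega) hjl hlt
    exact ⟨k, by omega, hd⟩
  · rintro ⟨k, hk, hd⟩
    refine ⟨k, hk, k + 1, ?_, ?_⟩
    · rw [List.mem_range'_1]; omega
    · rw [pvSwap_lt l k (k + 1) (by omega) (by omega)]; exact hd

theorem pv_per_string (u : String) :
    pvOuter u.toList (List.range (u.toList.length - 1)) =
      (fun u : String =>
        let l := u.toList
        if (List.range (l.length - 1)).any (fun k => l.getD (k + 1) ' ' < l.getD k ' ')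
        then "YES" else "NO") u := by
  simp only [pvOuter_if, pv_cond_eq]

theorem pv_foldl_append {α β : Type} (g : α → β) :
    ∀ (xs : List α) (acc : List β),
      xs.foldl (fun res x => res ++ [g x]) acc = acc ++ xs.map g := by
  intro xs
  induction xs with
  | nil => simp
  | cons x xs ih => intro acc; simp [List.foldl_cons, ih]

-- ===== VERDICT (by name: the statement is the Claim_ definition above) =====
theorem possibleChanges_spec : Claim_equal_possibleChanges := by
  intro usernames _
  unfold Spec_possibleChanges possibleChanges possibleChanges_alt
  rw [pv_foldl_append, List.nil_append]
  exact List.map_congr_left (fun u _ => pv_per_string u)
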